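-- pv_equiv track=rewrite | github.com/jeromeabel/ai-blog-partner | blogger/validation_utils.py | check_outline_structure
-- ===== SOURCE A (Python) =====
-- def check_outline_structure(outline_text: str) -> tuple[bool, list[str]]:
--     """
--     Check if outline has required structure and sections.
--
--     Validates:
--     - Outline is not empty
--     - Has at least 3 sections (## markdown headings)
--     - Contains "Introduction" section
--     - Contains "Conclusion" section
--
--     Args:
--         outline_text: The outline markdown text
--
--     Returns:
--         (is_valid, reasons) tuple
--         - is_valid: True if all checks pass
--         - reasons: List of failure reasons (empty if valid)
--
--     Examples:
--         >>> outline = "# Title\\n\\n## Introduction\\n\\n## Body\\n\\n## Conclusion"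
--         >>> check_outline_structure(outline)
--         (True, [])
--
--         >>> outline = "# Title\\n\\n## Introduction"
--         >>> is_valid, reasons = check_outline_structure(outline)
--         >>> is_valid
--         False
--         >>> "only 1 sections (need 3+)" in reasons
--         True
--     """
--     reasons = []
--
--     # Check 1: Not empty
--     if not outline_text:
--         reasons.append("outline is empty")
--         return False, reasons
--
--     # Check 2: Extract sections (lines starting with "## ")
--     sections = [line for line in outline_text.split("\n") if line.startswith("## ")]
--     num_sections = len(sections)
--
--     # Check 3: At least 3 sections
--     if num_sections < 3:
--         reasons.append(f"only {num_sections} sections (need 3+)")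
--
--     # Check 4: Has introduction
--     has_intro = any("intro" in s.lower() for s in sections)
--     if not has_intro:
--         reasons.append("missing Introduction section")
--
--     # Check 5: Has conclusion (check for "conclus" or "conclud" to match all variants)
--     has_conclusion = any(
--         "conclus" in s.lower() or "conclud" in s.lower() for s in sections
--     )
--     if not has_conclusion:
--         reasons.append("missing Conclusion section")
--
--     is_valid = len(reasons) == 0
--     return is_valid, reasons
-- ===== SOURCE B (Python) =====
-- def check_outline_structure(outline_text: str) -> tuple[bool, list[str]]:
--     if not outline_text:
--         return False, ["outline is empty"]
--     # Streaming character scan: no split(), no sections list. A sentinel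
--     # newline flushes the last buffered line.
--     count = 0
--     has_intro = False
--     has_conclusion = False
--     buf = []
--     for ch in outline_text + "\n":
--         if ch == "\n":
--             line = "".join(buf)
--             buf = []
--             if line.startswith("## "):
--                 count += 1
--                 low = line.lower()
--                 has_intro = has_intro or "intro" in low
--                 has_conclusion = has_conclusion or "conclus" in low or "conclud" in low
--         else:
--             buf.append(ch)
--     reasons = []
--     if count < 3:
--         reasons.append(f"only {count} sections (need 3+)")
--     if not has_intro:
--         reasons.append("missing Introduction section")
--     if not has_conclusion:
--         reasons.append("missing Conclusion section")
--     return not reasons, reasons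
-- ===== Notes on version B (the rewrite author's own statement) =====
-- stated objective: alternative
-- what changed: Replaces a line split plus a sections list + three separate scans (len and two any-generators) by a streaming character-level scan: one pass over the characters of outline_text with a sentinel newline appended, buffering the current line and flushing/testing it at each newline.
import Mathlib
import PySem

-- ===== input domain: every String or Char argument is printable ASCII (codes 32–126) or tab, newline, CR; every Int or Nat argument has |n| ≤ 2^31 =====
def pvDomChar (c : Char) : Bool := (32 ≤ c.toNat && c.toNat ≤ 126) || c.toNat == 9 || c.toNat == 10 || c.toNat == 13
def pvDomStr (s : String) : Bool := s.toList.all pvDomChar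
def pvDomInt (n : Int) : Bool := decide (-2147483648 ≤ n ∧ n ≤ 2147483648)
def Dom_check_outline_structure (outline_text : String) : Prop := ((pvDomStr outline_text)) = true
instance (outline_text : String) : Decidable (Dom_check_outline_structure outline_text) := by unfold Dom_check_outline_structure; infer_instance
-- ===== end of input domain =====

-- B replaces split()+sections list+three scans by a streaming character scan with a
-- line buffer (a sentinel newline flushes the last line); same cost, different traversal.

-- ===== PORT A =====
def check_outline_structure (outline_text : String) : Bool × List String :=
  if PySem.Str.len outline_text == 0 then (false, ["outline is empty"])
  else
    let sections := ((PySem.Str.split? outline_text "\n").getD []).filter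
      (fun line => PySem.Str.startswith line "## ")
    let num_sections : Int := (sections.length : Int)
    let reasons1 := if num_sections < 3 then
        ["only " ++ PySem.Int.toStr num_sections ++ " sections (need 3+)"] else []
    let has_intro := sections.any (fun s => PySem.Str.isIn "intro" (PySem.Str.lower s))
    let reasons2 := reasons1 ++ (if has_intro then [] else ["missing Introduction section"])
    let has_conclusion := sections.any (fun s =>
      PySem.Str.isIn "conclus" (PySem.Str.lower s) || PySem.Str.isIn "conclud" (PySem.Str.lower s))
    let reasons3 := reasons2 ++ (if has_conclusion then [] else ["missing Conclusion section"])
    (reasons3.length == 0, reasons3)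

-- ===== PORT B =====
-- flushing one buffered line: the body of Source B's `if ch == "\n":` branch
def cosProc (s : Int × Bool × Bool) (buf : List Char) : Int × Bool × Bool :=
  let line := String.ofList buf          -- "".join(buf)
  if PySem.Str.startswith line "## " then
    let low := PySem.Str.lower line
    (s.1 + 1,
     s.2.1 || PySem.Str.isIn "intro" low,
     s.2.2 || (PySem.Str.isIn "conclus" low || PySem.Str.isIn "conclud" low))
  else s

-- Source B's character loop: `for ch in outline_text + "\n": ...`
def cosScan (outline_text : String) : (Int × Bool × Bool) × List Char :=
  (outline_text.toList ++ ['\n']).foldl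
    (fun st ch => if ch == '\n' then (cosProc st.1 st.2, ([] : List Char))
                  else (st.1, st.2 ++ [ch]))
    ((0, false, false), [])

def check_outline_structure_alt (outline_text : String) : Bool × List String :=
  if PySem.Str.len outline_text == 0 then (false, ["outline is empty"])
  else
    let st := (cosScan outline_text).1
    let reasons :=
      (if st.1 < 3 then ["only " ++ PySem.Int.toStr st.1 ++ " sections (need 3+)"] else [])
      ++ (if st.2.1 then [] else ["missing Introduction section"])
      ++ (if st.2.2 then [] else ["missing Conclusion section"])
    (reasons.isEmpty, reasons)

-- ===== PRECONDITION & SPEC =====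
def Spec_check_outline_structure (outline_text : String) (out : Bool × List String) : Prop := out = check_outline_structure_alt outline_text
instance (outline_text : String) (out : Bool × List String) : Decidable (Spec_check_outline_structure outline_text out) := by unfold Spec_check_outline_structure; infer_instance

-- ===== CLAIM (what is proved, stated in full; the proofs are below) =====
def Claim_equal_check_outline_structure : Prop := ∀ (outline_text : String), Dom_check_outline_structure outline_text → Spec_check_outline_structure outline_text (check_outline_structure outline_text)

-- ===== LEMMAS AND PROOFS =====

-- reference line-splitting on '\n' (line built front-to-back, as Source B's buffer)
def linesAux (pre : List Char) : List Char → List (List Char)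
  | [] => [pre]
  | c :: r => if c == '\n' then pre :: linesAux [] r else linesAux (pre ++ [c]) r

lemma splitOn_go_newline : ∀ (fuel : Nat) (l cur : List Char) (acc : List (List Char)),
    l.length < fuel →
    PySem.Chars.splitOn.go ['\n'] fuel l cur acc
      = acc.reverse ++ linesAux cur.reverse l := by
  intro fuel
  induction fuel with
  | zero => intro l cur acc h; omega
  | succ f ih =>
    intro l cur acc h
    cases l with
    | nil => simp [PySem.Chars.splitOn.go, linesAux]
    | cons c rest =>
      by_cases hc : c = '\n'
      · subst hc
        have hp : List.isPrefixOf ['\n'] ('\n' :: rest) = true := rfl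
        rw [PySem.Chars.splitOn.go, hp, if_pos rfl]
        show PySem.Chars.splitOn.go ['\n'] f rest [] (cur.reverse :: acc)
          = acc.reverse ++ linesAux cur.reverse ('\n' :: rest)
        rw [ih rest [] (cur.reverse :: acc)
          (by simp only [List.length_cons] at h; omega)]
        simp [linesAux]
      · have hp : List.isPrefixOf ['\n'] (c :: rest) = false := by
          show (('\n' == c) && List.isPrefixOf [] rest) = false
          simp [Ne.symm hc]
        rw [PySem.Chars.splitOn.go, hp, if_neg Bool.false_ne_true]
        rw [ih rest (c :: cur) acc (by simp only [List.length_cons] at h; omega)]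
        simp [linesAux, hc]

lemma splitOn_newline (cs : List Char) :
    PySem.Chars.splitOn cs ['\n'] = linesAux [] cs := by
  unfold PySem.Chars.splitOn
  rw [splitOn_go_newline (cs.length + 1) cs [] [] (by omega)]
  simp

-- Source B's char loop processes exactly the lines of the input
lemma cosScan_go : ∀ (cs : List Char) (s0 : Int × Bool × Bool) (pre : List Char),
    (cs ++ ['\n']).foldl
      (fun st ch => if ch == '\n' then (cosProc st.1 st.2, ([] : List Char))
                    else (st.1, st.2 ++ [ch]))
      (s0, pre)
    = ((linesAux pre cs).foldl cosProc s0, []) := by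
  intro cs
  induction cs with
  | nil => intro s0 pre; simp [linesAux]
  | cons c r ih =>
    intro s0 pre
    rw [List.cons_append, List.foldl_cons]
    by_cases hc : c = '\n'
    · subst hc
      show List.foldl _ (cosProc s0 pre, []) (r ++ ['\n']) = _
      rw [ih (cosProc s0 pre) []]
      simp [linesAux]
    · rw [if_neg (by simp [hc])]
      show List.foldl _ (s0, pre ++ [c]) (r ++ ['\n']) = _
      rw [ih s0 (pre ++ [c])]
      simp [linesAux, hc]

-- unrolling the accumulator of the line-processing fold
lemma cosProc_fold (L : List (List Char)) : ∀ (n : Int) (a b : Bool),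
    L.foldl cosProc (n, a, b)
    = (n + ((L.filter (fun l => PySem.Str.startswith (String.ofList l) "## ")).length : Int),
       a || (L.filter (fun l => PySem.Str.startswith (String.ofList l) "## ")).any
          (fun l => PySem.Str.isIn "intro" (PySem.Str.lower (String.ofList l))),
       b || (L.filter (fun l => PySem.Str.startswith (String.ofList l) "## ")).any
          (fun l => PySem.Str.isIn "conclus" (PySem.Str.lower (String.ofList l))
                 || PySem.Str.isIn "conclud" (PySem.Str.lower (String.ofList l)))) := by
  induction L with
  | nil => simp
  | cons l t ih =>
    intro n a b
    rw [List.foldl_cons]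
    by_cases h : PySem.Str.startswith (String.ofList l) "## " = true
    · rw [show cosProc (n, a, b) l =
        (n + 1, a || PySem.Str.isIn "intro" (PySem.Str.lower (String.ofList l)),
         b || (PySem.Str.isIn "conclus" (PySem.Str.lower (String.ofList l))
            || PySem.Str.isIn "conclud" (PySem.Str.lower (String.ofList l)))) from by
          simp only [cosProc]; rw [if_pos h]]
      rw [ih]
      simp only [List.filter_cons, h, if_true, List.length_cons, List.any_cons, Prod.mk.injEq]
      refine ⟨by push_cast; ring, by rw [Bool.or_assoc], by rw [Bool.or_assoc]⟩
    · rw [show cosProc (n, a, b) l = (n, a, b) from by simp only [cosProc]; rw [if_neg h]]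
      rw [ih]
      simp only [List.filter_cons, h, Bool.false_eq_true, if_false]

-- A's sections, seen through toList
lemma sections_map (t : String) :
    ((PySem.Str.split? t "\n").getD []).filter (fun line => PySem.Str.startswith line "## ")
    = ((linesAux [] t.toList).filter
        (fun l => PySem.Str.startswith (String.ofList l) "## ")).map String.ofList := by
  have hsplit : PySem.Str.split? t "\n"
      = some ((linesAux [] t.toList).map String.ofList) := by
    have h := PySem.Str.split?_map t "\n"
    rw [show ("\n" : String).toList = ['\n'] from rfl] at h
    rw [show PySem.Chars.split? t.toList ['\n']
        = some (PySem.Chars.splitOn t.toList ['\n']) from rfl, splitOn_newline] at h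
    cases hs : PySem.Str.split? t "\n" with
    | none => rw [hs] at h; exact absurd h (by simp)
    | some L =>
      rw [hs] at h
      simp only [Option.map_some, Option.some.injEq] at h
      have : L = (linesAux [] t.toList).map String.ofList := by
        rw [← h, List.map_map]
        simp [Function.comp_def]
      rw [this]
  rw [hsplit]
  simp only [Option.getD_some]
  rw [List.filter_map]
  simp only [Function.comp_def]

lemma cosScan_eq (t : String) :
    (cosScan t).1 = (linesAux [] t.toList).foldl cosProc (0, false, false) := by
  unfold cosScan
  rw [cosScan_go t.toList (0, false, false) []]

-- ===== VERDICT (by name: the statement is the Claim_ definition above) =====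
theorem check_outline_structure_spec : Claim_equal_check_outline_structure := by
  intro t _
  unfold Spec_check_outline_structure check_outline_structure check_outline_structure_alt
  by_cases h : (PySem.Str.len t == 0) = true
  · rw [if_pos h, if_pos h]
  · rw [if_neg h, if_neg h]
    have hb : ∀ (L : List String), L.isEmpty = (L.length == 0) := fun L => by cases L <;> rfl
    simp only [sections_map, cosScan_eq, cosProc_fold, List.length_map, List.any_map,
      Function.comp_def, Int.zero_add, Bool.false_or, hb]
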